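-- pv_equiv track=rewrite | github.com/kenami0981/Antyplagiat | Antyplagiat/analiza.py | build_word_mapping
-- ===== SOURCE A (Python) =====
-- def build_word_mapping(normalized, original):
--     norm_words = normalized.split()
--     orig_words = original.split()
--     mapping = []
--     j = 0
--     for i in range(len(norm_words)):
--         while j < len(orig_words) and norm_words[i] != orig_words[j].lower():
--             j += 1
--         if j < len(orig_words):
--             mapping.append(j)
--             j += 1
--     return mapping
-- ===== SOURCE B (Python) =====
-- def _first_at_least(a, x):
--     # binary search: index of the first element of sorted list a that is >= x
--     lo, hi = 0, len(a)
--     while lo < hi: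
--         mid = (lo + hi) // 2
--         if a[mid] < x:
--             lo = mid + 1
--         else:
--             hi = mid
--     return lo
--
-- def build_word_mapping(normalized, original):
--     # index each lowercased original word by its sorted list of positions
--     positions = {}
--     for j, w in enumerate(original.split()):
--         positions.setdefault(w.lower(), []).append(j)
--     mapping = []
--     j = 0
--     for word in normalized.split():
--         idxs = positions.get(word, [])
--         k = _first_at_least(idxs, j)
--         if k == len(idxs):
--             break  # no remaining occurrence: nothing later can match either
--         j = idxs[k]
--         mapping.append(j)
--         j += 1
--     return mapping
-- ===== Notes on version B (the rewrite author's own statement) =====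
-- stated objective: alternative
-- what changed: Instead of A's in-order two-pointer scan of the original words, B builds an occurrence index once (dict: lowercased original word -> sorted list of its positions) and answers each normalized word with a hand-written binary search for its first position past the last match, breaking when none remains.
import Mathlib
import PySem

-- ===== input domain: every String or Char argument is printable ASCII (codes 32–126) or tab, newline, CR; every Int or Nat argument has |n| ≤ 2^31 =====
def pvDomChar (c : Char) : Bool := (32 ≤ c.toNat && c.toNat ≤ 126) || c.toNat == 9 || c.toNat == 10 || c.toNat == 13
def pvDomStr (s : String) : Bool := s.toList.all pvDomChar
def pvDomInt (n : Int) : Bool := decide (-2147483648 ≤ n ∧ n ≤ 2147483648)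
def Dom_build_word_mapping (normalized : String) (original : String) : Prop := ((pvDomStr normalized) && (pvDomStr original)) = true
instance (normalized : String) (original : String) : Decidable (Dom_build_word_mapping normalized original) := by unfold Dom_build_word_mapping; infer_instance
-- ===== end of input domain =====

-- B replaces A's in-order two-pointer scan by a different data structure: an occurrence
-- index (dict: lowercased original word -> sorted list of its positions) built once, then
-- a binary search per normalized word for its first unused position (objective: alternative).

-- ===== PORT A =====
-- the inner `while j < len(orig_words) and norm_words[i] != orig_words[j].lower(): j += 1`
def pvAWhile (w : String) (os : List String) (j : Nat) : Nat :=
  if j < os.length ∧ w ≠ PySem.Str.lower (os.getD j "") then pvAWhile w os (j + 1) else j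
termination_by os.length - j
decreasing_by omega

-- one iteration of A's outer for-loop: state = (mapping, j), argument = norm_words[i]
def pvAStep (os : List String) (st : List Int × Nat) (n : String) : List Int × Nat :=
  let j := pvAWhile n os st.2
  if j < os.length then (st.1 ++ [(j : Int)], j + 1) else (st.1, j)

def build_word_mapping (normalized : String) (original : String) : List Int :=
  let norm_words := PySem.Str.split₀ normalized
  let orig_words := PySem.Str.split₀ original
  let st := (List.range norm_words.length).foldl
    (fun st i => pvAStep orig_words st (norm_words.getD i "")) ([], 0)
  st.1

-- ===== PORT B =====
-- `_first_at_least(a, x)`: binary search, index of first element of sorted a that is >= x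
def pvBisect (a : List Int) (x : Int) (lo hi : Nat) : Nat :=
  if h : lo < hi then
    let mid := (lo + hi) / 2
    if a.getD mid 0 < x then pvBisect a x (mid + 1) hi else pvBisect a x lo mid
  else lo
termination_by hi - lo
decreasing_by all_goals omega

-- `positions.setdefault(w.lower(), []).append(j)` over enumerate(original.split())
def pvBuildPos (os : List String) : PySem.Dict String (List Int) :=
  (PySem.List.enumerate os 0).foldl
    (fun d jw => d.modify (PySem.Str.lower jw.2) [] (· ++ [jw.1])) PySem.Dict.empty

-- B's main for-loop over normalized words (break = return the mapping built so far)
def pvBLoop (pos : PySem.Dict String (List Int)) : List String → Int → List Int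
  | [], _ => []
  | n :: ns, j =>
    let idxs := pos.getD n []
    let k := pvBisect idxs j 0 idxs.length
    if k = idxs.length then []
    else
      let p := idxs.getD k 0
      p :: pvBLoop pos ns (p + 1)

def build_word_mapping_alt (normalized : String) (original : String) : List Int :=
  pvBLoop (pvBuildPos (PySem.Str.split₀ original)) (PySem.Str.split₀ normalized) 0

-- ===== PRECONDITION & SPEC =====
def Spec_build_word_mapping (normalized : String) (original : String) (out : List Int) : Prop := out = build_word_mapping_alt normalized original
instance (normalized : String) (original : String) (out : List Int) : Decidable (Spec_build_word_mapping normalized original out) := by unfold Spec_build_word_mapping; infer_instance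

-- ===== CLAIM (what is proved, stated in full; the proofs are below) =====
def Claim_equal_build_word_mapping : Prop := ∀ (normalized : String) (original : String), Dom_build_word_mapping normalized original → Spec_build_word_mapping normalized original (build_word_mapping normalized original)

-- ===== LEMMAS AND PROOFS =====

-- common greedy-matching specification, on the remaining suffix of the original words
def pvGreedy : List String → List String → Nat → List Int
  | _, [], _ => []
  | [], _ :: _, _ => []
  | n :: ns', o :: os', j =>
    if n = PySem.Str.lower o then (j : Int) :: pvGreedy ns' os' (j + 1)
    else pvGreedy (n :: ns') os' (j + 1)

-- positions (as Int) of the words of os whose lowercase equals w, counting from b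
def pvOcc : List String → String → Nat → List Int
  | [], _, _ => []
  | o :: os, w, b =>
    if PySem.Str.lower o = w then (b : Int) :: pvOcc os w (b + 1) else pvOcc os w (b + 1)

----------------------------------------------------------------- A-side (as before)

theorem pvAWhile_ge (w : String) (os : List String) (j : Nat) (h : ¬ j < os.length) :
    pvAWhile w os j = j := by
  rw [pvAWhile]; simp [h]

theorem pvAWhile_match (w : String) (os : List String) (j : Nat)
    (hm : w = PySem.Str.lower (os.getD j "")) : pvAWhile w os j = j := by
  rw [pvAWhile]; simp [hm]

theorem pvAWhile_skip (w : String) (os : List String) (j : Nat) (h : j < os.length)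
    (hm : w ≠ PySem.Str.lower (os.getD j "")) : pvAWhile w os j = pvAWhile w os (j + 1) := by
  conv_lhs => rw [pvAWhile]
  rw [if_pos ⟨h, hm⟩]

theorem pvAfold_stuck (os ns : List String) (acc : List Int) (j : Nat) (h : ¬ j < os.length) :
    List.foldl (pvAStep os) (acc, j) ns = (acc, j) := by
  induction ns with
  | nil => rfl
  | cons n ns ih =>
    simp only [List.foldl_cons]
    have : pvAStep os (acc, j) n = (acc, j) := by
      simp [pvAStep, pvAWhile_ge _ _ _ h, h]
    rw [this, ih]

theorem pvAfold (os ns : List String) (j : Nat) (acc : List Int) :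
    (List.foldl (pvAStep os) (acc, j) ns).1 = acc ++ pvGreedy ns (os.drop j) j := by
  by_cases hj : j < os.length
  · have hdrop : os.drop j = os[j] :: os.drop (j + 1) := List.drop_eq_getElem_cons hj
    cases ns with
    | nil => rw [hdrop]; simp [pvGreedy]
    | cons n ns' =>
      by_cases hm : n = PySem.Str.lower (os.getD j "")
      · have hw : pvAWhile n os j = j := pvAWhile_match _ _ _ hm
        have hg : os.getD j "" = os[j] := List.getD_eq_getElem _ _ hj
        simp only [List.foldl_cons, pvAStep, hw, if_pos hj]
        rw [pvAfold os ns' (j + 1) (acc ++ [(j : Int)])]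
        rw [hdrop]
        have hm' : n = PySem.Str.lower os[j] := by rw [hm, hg]
        simp [pvGreedy, hm']
      · have hstep : pvAStep os (acc, j) n = pvAStep os (acc, j + 1) n := by
          simp [pvAStep, pvAWhile_skip _ _ _ hj hm]
        simp only [List.foldl_cons, hstep]
        have := pvAfold os (n :: ns') (j + 1) acc
        simp only [List.foldl_cons] at this
        rw [this, hdrop]
        have hg : os.getD j "" = os[j] := List.getD_eq_getElem _ _ hj
        rw [hg] at hm
        simp [pvGreedy, hm]
  · rw [pvAfold_stuck os ns acc j hj]
    have : os.drop j = [] := by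
      simp [List.drop_eq_nil_iff]; omega
    rw [this]
    cases ns <;> simp [pvGreedy]
termination_by (os.length - j, ns.length)
decreasing_by all_goals (simp_wf; omega)

theorem pvRange_map_getD (l : List String) :
    (List.range l.length).map (fun i => l.getD i "") = l := by
  apply List.ext_getElem
  · simp
  · intro n h1 h2
    simp [List.getElem?_eq_getElem h2]

----------------------------------------------------------------- pvOcc facts

theorem pvOcc_ge (os : List String) (w : String) (b : Nat) :
    ∀ x ∈ pvOcc os w b, (b : Int) ≤ x := by
  induction os generalizing b with
  | nil => simp [pvOcc]
  | cons o os ih =>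
    intro x hx
    simp only [pvOcc] at hx
    split_ifs at hx with h
    · rcases List.mem_cons.1 hx with rfl | hx
      · exact le_refl _
      · have := ih (b + 1) x hx; push_cast at this ⊢; omega
    · have := ih (b + 1) x hx; push_cast at this ⊢; omega

theorem pvOcc_sorted (os : List String) (w : String) (b : Nat) :
    (pvOcc os w b).Pairwise (· < ·) := by
  induction os generalizing b with
  | nil => simp [pvOcc]
  | cons o os ih =>
    simp only [pvOcc]
    split_ifs with h
    · refine List.pairwise_cons.2 ⟨?_, ih (b + 1)⟩
      intro x hx
      have := pvOcc_ge os w (b + 1) x hx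
      push_cast at this ⊢; omega
    · exact ih (b + 1)

-- dropping the elements < a + b of pvOcc os w b = pvOcc of the a-dropped list
theorem pvOcc_dropWhile (a : Nat) (os : List String) (w : String) (b : Nat) :
    (pvOcc os w b).dropWhile (fun x => decide (x < ((a : Int) + b))) = pvOcc (os.drop a) w (a + b) := by
  induction a generalizing os b with
  | zero =>
    cases hc : pvOcc os w b with
    | nil => simp [hc]
    | cons x xs =>
      have hx : (b : Int) ≤ x := pvOcc_ge os w b x (by rw [hc]; exact List.mem_cons_self)
      simp only [Nat.cast_zero, zero_add, List.drop_zero, hc]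
      rw [List.dropWhile_cons_of_neg (by simp only [decide_eq_true_eq, not_lt]; omega)]
  | succ a ih =>
    cases os with
    | nil => simp [pvOcc]
    | cons o os =>
      simp only [pvOcc, List.drop_succ_cons]
      have harith : ((a : Int) + 1 + b) = ((a : Int) + ((b : Nat) + 1 : Nat)) := by push_cast; ring
      split_ifs with h
      · rw [List.dropWhile_cons_of_pos (by simp only [decide_eq_true_eq]; push_cast; omega)]
        rw [show (((a+1 : Nat) : Int) + b) = ((a : Int) + ((b + 1 : Nat) : Int)) by push_cast; ring]
        rw [show a + 1 + b = a + (b + 1) by omega] at *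
        exact (by push_cast; exact ih os (b + 1))
      · rw [show (((a+1 : Nat) : Int) + b) = ((a : Int) + ((b + 1 : Nat) : Int)) by push_cast; ring]
        rw [show a + 1 + b = a + (b + 1) by omega]
        exact (by push_cast; exact ih os (b + 1))

----------------------------------------------------------------- pvBuildPos

theorem pvBuildPos_aux (os : List String) (w : String) (b : Nat)
    (d : PySem.Dict String (List Int)) :
    (((PySem.List.enumerate os (b : Int)).foldl
      (fun d jw => d.modify (PySem.Str.lower jw.2) [] (· ++ [jw.1])) d).getD w [])
      = d.getD w [] ++ pvOcc os w b := by
  induction os generalizing b d with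
  | nil => simp [PySem.List.enumerate_nil, pvOcc]
  | cons o os ih =>
    rw [PySem.List.enumerate_cons, List.foldl_cons]
    have hcast : ((b : Int) + 1) = (((b + 1 : Nat)) : Int) := by push_cast; ring
    rw [hcast, ih (b + 1)]
    by_cases h : PySem.Str.lower o = w
    · rw [h, PySem.Dict.getD_modify_self]
      simp [pvOcc, h]
    · rw [PySem.Dict.getD_modify_of_ne _ _ _ (fun hc : w = PySem.Str.lower o => h hc.symm)]
      simp [pvOcc, h]

theorem pvBuildPos_getD (os : List String) (w : String) :
    (pvBuildPos os).getD w [] = pvOcc os w 0 := by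
  have := pvBuildPos_aux os w 0 PySem.Dict.empty
  simpa [pvBuildPos] using this

----------------------------------------------------------------- binary search

-- elements of the `< x` prefix of a satisfy the bound
theorem pvTW_lt (a : List Int) (x : Int) (t : Nat)
    (ht : t < (a.takeWhile (fun y => decide (y < x))).length) :
    t < a.length ∧ a.getD t 0 < x := by
  have hpre : a.takeWhile (fun y => decide (y < x)) <+: a := List.takeWhile_prefix _
  have hlen : (a.takeWhile (fun y => decide (y < x))).length ≤ a.length := hpre.length_le
  have hta : t < a.length := by omega
  refine ⟨hta, ?_⟩
  have hget : (a.takeWhile (fun y => decide (y < x)))[t] = a[t] :=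
    List.IsPrefix.getElem hpre ht
  have hmem : (a.takeWhile (fun y => decide (y < x)))[t] ∈ a.takeWhile (fun y => decide (y < x)) :=
    List.getElem_mem ht
  have := List.mem_takeWhile_imp hmem
  rw [hget] at this
  simp only [decide_eq_true_eq] at this
  rwa [List.getD_eq_getElem a 0 hta]

-- for a sorted list, every element at or after the `< x` prefix is ≥ x
theorem pvTW_ge (a : List Int) (x : Int) (hs : a.Pairwise (· < ·)) (t : Nat)
    (htL : (a.takeWhile (fun y => decide (y < x))).length ≤ t) (hta : t < a.length) :
    ¬ a.getD t 0 < x := by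
  set tw := a.takeWhile (fun y => decide (y < x)) with htw
  set dw := a.dropWhile (fun y => decide (y < x)) with hdwdef
  have hsplit : tw ++ dw = a := List.takeWhile_append_dropWhile
  have hlen : tw.length + dw.length = a.length := by
    rw [← hsplit]; simp
  have hdwne : dw ≠ [] := by
    intro h; rw [h] at hlen; simp at hlen; omega
  obtain ⟨p, rest, hpr⟩ := List.exists_cons_of_ne_nil hdwne
  have hph := List.head_dropWhile_not (fun y => decide (y < x)) (l := a) hdwne
  have hhead : dw.head hdwne = p := by simp [hpr]
  rw [hhead] at hph
  have hpx : ¬ p < x := by simpa using hph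
  have haL? : a[tw.length]? = some p := by
    rw [← hsplit, List.getElem?_append_right (le_refl _)]
    simp [hpr]
  have haL : a[tw.length]'(by omega) = p := by
    have h2 := List.getElem?_eq_getElem (l := a) (i := tw.length) (by omega)
    rw [haL?] at h2
    exact (Option.some.inj h2).symm
  rw [List.getD_eq_getElem a 0 hta]
  rcases Nat.eq_or_lt_of_le htL with heq | hlt
  · subst heq
    simpa [haL] using hpx
  · have hmono := List.pairwise_iff_getElem.1 hs tw.length t (by omega) hta hlt
    simp only [haL] at hmono
    omega

theorem pvBisect_eq (a : List Int) (x : Int) (hs : a.Pairwise (· < ·)) :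
    ∀ (k lo hi : Nat), hi - lo = k →
      lo ≤ (a.takeWhile (fun y => decide (y < x))).length →
      (a.takeWhile (fun y => decide (y < x))).length ≤ hi → hi ≤ a.length →
      pvBisect a x lo hi = (a.takeWhile (fun y => decide (y < x))).length := by
  intro k
  induction k using Nat.strong_induction_on with
  | _ k ih =>
    intro lo hi hk hloL hLhi hlen
    set L := (a.takeWhile (fun y => decide (y < x))).length with hL
    rw [pvBisect]
    by_cases h : lo < hi
    · rw [dif_pos h]
      set mid := (lo + hi) / 2 with hmid
      have hmlo : lo ≤ mid := by omega
      have hmhi : mid < hi := by omega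
      by_cases hm : a.getD mid 0 < x
      · rw [if_pos hm]
        have hmidL : mid < L := by
          by_contra hge
          exact pvTW_ge a x hs mid (by omega) (by omega) hm
        exact ih (hi - (mid + 1)) (by omega) (mid + 1) hi rfl (by omega) hLhi hlen
      · rw [if_neg hm]
        have hLmid : L ≤ mid := by
          by_contra hlt
          exact hm (pvTW_lt a x mid (by omega)).2
        exact ih (mid - lo) (by omega) lo mid rfl hloL hLmid (by omega)
    · rw [dif_neg h]
      omega

----------------------------------------------------------------- greedy vs occurrences

theorem pvGreedy_head (ns : List String) (n : String) (os : List String) (j : Nat) :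
    pvGreedy (n :: ns) (os.drop j) j =
      match pvOcc (os.drop j) n j with
      | [] => []
      | p :: _ => p :: pvGreedy ns (os.drop (p.toNat + 1)) (p.toNat + 1) := by
  by_cases hj : j < os.length
  · have hdrop : os.drop j = os[j] :: os.drop (j + 1) := List.drop_eq_getElem_cons hj
    rw [hdrop]
    by_cases hm : n = PySem.Str.lower os[j]
    · rw [show pvGreedy (n :: ns) (os[j] :: os.drop (j + 1)) j
          = (j : Int) :: pvGreedy ns (os.drop (j + 1)) (j + 1) by
        simp [pvGreedy, hm]]
      rw [show pvOcc (os[j] :: os.drop (j + 1)) n j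
          = (j : Int) :: pvOcc (os.drop (j + 1)) n (j + 1) by
        simp [pvOcc, hm.symm]]
      simp
    · rw [show pvGreedy (n :: ns) (os[j] :: os.drop (j + 1)) j
          = pvGreedy (n :: ns) (os.drop (j + 1)) (j + 1) by
        simp [pvGreedy, hm]]
      rw [show pvOcc (os[j] :: os.drop (j + 1)) n j
          = pvOcc (os.drop (j + 1)) n (j + 1) by
        simp only [pvOcc]
        rw [if_neg (show ¬PySem.Str.lower os[j] = n from fun hc => hm hc.symm)]]
      exact pvGreedy_head ns n os (j + 1)
  · have hnil : os.drop j = [] := by simp [List.drop_eq_nil_iff]; omega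
    rw [hnil]
    cases ns <;> simp [pvGreedy, pvOcc]
termination_by os.length - j
decreasing_by omega

----------------------------------------------------------------- B loop = greedy

theorem pvBLoop_eq (os : List String) (ns : List String) (j : Nat) :
    pvBLoop (pvBuildPos os) ns ((j : Nat) : Int) = pvGreedy ns (os.drop j) j := by
  induction ns generalizing j with
  | nil => cases h : os.drop j <;> simp [pvBLoop, pvGreedy]
  | cons n ns ih =>
    rw [pvBLoop]
    simp only [pvBuildPos_getD]
    set a := pvOcc os n 0 with ha
    have hs : a.Pairwise (· < ·) := pvOcc_sorted os n 0
    set L := (a.takeWhile (fun y => decide (y < (j : Int)))).length with hL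
    have hLlen : L ≤ a.length := (List.takeWhile_prefix _).length_le
    have hk : pvBisect a (j : Int) 0 a.length = L :=
      pvBisect_eq a (j : Int) hs a.length 0 a.length rfl (by omega) hLlen le_rfl
    have hdw : a.dropWhile (fun y => decide (y < (j : Int))) = pvOcc (os.drop j) n j := by
      have := pvOcc_dropWhile j os n 0
      simpa using this
    rw [hk]
    by_cases hend : L = a.length
    · rw [if_pos hend]
      have hdwnil : a.dropWhile (fun y => decide (y < (j : Int))) = [] := by
        have := List.takeWhile_append_dropWhile (p := fun y => decide (y < (j : Int))) (l := a)
        have hlen := congrArg List.length this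
        simp only [List.length_append] at hlen
        have : (a.dropWhile (fun y => decide (y < (j : Int)))).length = 0 := by omega
        exact List.length_eq_zero_iff.1 this
      rw [pvGreedy_head]
      rw [← hdw, hdwnil]
    · rw [if_neg hend]
      have hLlt : L < a.length := by omega
      obtain ⟨p, rest, hpr⟩ : ∃ p rest, a.dropWhile (fun y => decide (y < (j : Int))) = p :: rest := by
        cases hdd : a.dropWhile (fun y => decide (y < (j : Int))) with
        | nil =>
          have := List.takeWhile_append_dropWhile (p := fun y => decide (y < (j : Int))) (l := a)
          rw [hdd, List.append_nil] at this
          have := congrArg List.length this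
          omega
        | cons p rest => exact ⟨p, rest, rfl⟩
      have hgetD : a.getD L 0 = p := by
        conv_lhs => rw [← List.takeWhile_append_dropWhile (p := fun y => decide (y < (j : Int))) (l := a)]
        rw [hpr]
        rw [List.getD_eq_getElem _ 0 (by simp only [List.length_append, List.length_cons]; omega)]
        rw [List.getElem_append_right (by omega)]
        simp [hL]
      have hpmem : p ∈ pvOcc (os.drop j) n j := by rw [← hdw, hpr]; exact List.mem_cons_self
      have hpge : (j : Int) ≤ p := pvOcc_ge _ _ _ p hpmem
      have hpnat : p + 1 = ((p.toNat + 1 : Nat) : Int) := by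
        have : (0 : Int) ≤ p := by omega
        push_cast [Int.toNat_of_nonneg this]; ring
      rw [hgetD, hpnat, ih (p.toNat + 1)]
      rw [pvGreedy_head, ← hdw, hpr]

----------------------------------------------------------------- verdict

theorem build_word_mapping_spec : Claim_equal_build_word_mapping := by
  intro normalized original _
  unfold Spec_build_word_mapping build_word_mapping build_word_mapping_alt
  simp only []
  set ns := PySem.Str.split₀ normalized with hns
  set os := PySem.Str.split₀ original with hos
  have hA : (List.range ns.length).foldl
      (fun st i => pvAStep os st (ns.getD i "")) ([], 0)
      = List.foldl (pvAStep os) (([] : List Int), 0) ns := by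
    conv_rhs => rw [← pvRange_map_getD ns]
    rw [List.foldl_map]
  rw [hA, pvAfold os ns 0 []]
  have hB := pvBLoop_eq os ns 0
  simp only [Nat.cast_zero, List.drop_zero] at hB ⊢
  rw [hB]
  exact List.nil_append _
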